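-- pv_equiv track=rewrite | github.com/fmiccolis/django_cavallo_bot | botConfig.py | iterate_day
-- ===== SOURCE A (Python) =====
-- def iterate_day(days):
--     day_keyboard = list()
--     this_line = list()
--     for day in range(days):
--         if len(this_line) >= 5:
--             day_keyboard.append(this_line.copy())
--             this_line.clear()
--         this_line.append((day + 1))
--     day_keyboard.append(this_line)
--     return day_keyboard
-- ===== SOURCE B (Python) =====
-- def iterate_day(days):
--     nums = list(range(1, days + 1))
--     result = [nums[i:i + 5] for i in range(0, len(nums), 5)]
--     return result or [[]]
-- ===== Notes on version B (the rewrite author's own statement) =====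
-- stated objective: simpler
-- what changed: Replaces the per-element buffer/flush/copy loop with building the full day list once and chunking it by strided slicing; 'result or [[]]' keeps A's single empty row when the day list is empty (A appends its untouched empty buffer).
import Mathlib
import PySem

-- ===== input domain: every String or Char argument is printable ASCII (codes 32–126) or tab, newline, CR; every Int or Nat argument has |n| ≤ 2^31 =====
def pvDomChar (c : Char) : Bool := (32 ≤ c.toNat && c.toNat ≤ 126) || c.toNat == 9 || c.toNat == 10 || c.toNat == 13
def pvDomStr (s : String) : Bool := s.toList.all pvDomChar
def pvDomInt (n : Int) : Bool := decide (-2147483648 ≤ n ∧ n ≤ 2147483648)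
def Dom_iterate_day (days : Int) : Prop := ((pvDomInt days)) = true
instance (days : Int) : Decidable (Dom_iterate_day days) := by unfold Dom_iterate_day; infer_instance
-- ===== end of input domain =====

-- B builds the list 1..days once and chunks it by strided slicing instead of A's
-- per-element buffer/flush/copy loop; objective: simpler. Both programs are total.

-- ===== PORT A =====
-- one loop iteration of A: flush this_line into day_keyboard when it holds 5, then append day+1
def iterateDayStep (st : List (List Int) × List Int) (day : Int) :
    List (List Int) × List Int :=
  match st with
  | (day_keyboard, this_line) =>
    if this_line.length ≥ 5 then (day_keyboard ++ [this_line], [day + 1])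
    else (day_keyboard, this_line ++ [day + 1])

def iterate_day (days : Int) : List (List Int) :=
  -- for day in range(days): …  folding (day_keyboard, this_line)
  let st := (PySem.List.pyRange 0 days 1).foldl iterateDayStep ([], [])
  -- day_keyboard.append(this_line)
  st.1 ++ [st.2]

-- ===== PORT B =====
def iterate_day_alt (days : Int) : List (List Int) :=
  -- nums = list(range(1, days + 1))
  let nums := PySem.List.pyRange 1 (days + 1) 1
  -- result = [nums[i:i+5] for i in range(0, len(nums), 5)]
  let result := (PySem.List.pyRange 0 (PySem.List.len nums) 5).map
      (fun i => PySem.List.slice nums (some i) (some (i + 5)))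
  -- return result or [[]]
  if result = [] then [[]] else result

-- ===== PRECONDITION & SPEC =====
def Spec_iterate_day (days : Int) (out : List (List Int)) : Prop := out = iterate_day_alt days
instance (days : Int) (out : List (List Int)) : Decidable (Spec_iterate_day days out) := by unfold Spec_iterate_day; infer_instance

-- ===== CLAIM (what is proved, stated in full; the proofs are below) =====
def Claim_equal_iterate_day : Prop := ∀ (days : Int), Dom_iterate_day days → Spec_iterate_day days (iterate_day days)

-- ===== LEMMAS AND PROOFS =====

-- common characterisation: chunks of 5 consecutive elements, last chunk 0..5 long
def chunkRec (l : List Int) : List (List Int) :=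
  if _h : l.length ≤ 5 then [l] else l.take 5 :: chunkRec (l.drop 5)
termination_by l.length
decreasing_by simp; omega

lemma chunkRec_small {l : List Int} (h : l.length ≤ 5) : chunkRec l = [l] := by
  rw [chunkRec]; simp [h]

lemma chunkRec_big {l : List Int} (h : ¬ l.length ≤ 5) :
    chunkRec l = l.take 5 :: chunkRec (l.drop 5) := by
  rw [chunkRec]; simp [h]

lemma chunkRec_ne_nil (l : List Int) : chunkRec l ≠ [] := by
  rw [chunkRec]; split <;> simp

lemma foldA : ∀ (ys : List Int) (kb : List (List Int)) (line : List Int),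
    line.length ≤ 5 →
    ((ys.foldl iterateDayStep (kb, line)).1 ++ [(ys.foldl iterateDayStep (kb, line)).2])
      = kb ++ chunkRec (line ++ ys.map (fun y => y + 1)) := by
  intro ys
  induction ys with
  | nil =>
    intro kb line h
    simp only [List.foldl_nil, List.map_nil, List.append_nil]
    rw [chunkRec_small h]
  | cons y ys ih =>
    intro kb line h
    by_cases h5 : line.length ≥ 5
    · have h5' : line.length = 5 := le_antisymm h h5
      simp only [List.foldl_cons, iterateDayStep]
      rw [if_pos h5]
      rw [ih (kb ++ [line]) [y + 1] (by simp)]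
      rw [List.append_assoc]
      congr 1
      rw [List.map_cons]
      rw [chunkRec_big (l := line ++ (y + 1) :: ys.map (fun y => y + 1))
        (by simp only [List.length_append, List.length_cons, List.length_map, h5']; omega)]
      have htake : (line ++ (y + 1) :: ys.map (fun y => y + 1)).take 5 = line := by
        rw [← h5', List.take_left]
      have hdrop : (line ++ (y + 1) :: ys.map (fun y => y + 1)).drop 5 = (y + 1) :: ys.map (fun y => y + 1) := by
        rw [← h5', List.drop_left]
      rw [htake, hdrop]
      simp
    · simp only [List.foldl_cons, iterateDayStep]
      rw [if_neg h5]
      rw [ih kb (line ++ [y + 1]) (by simp; omega)]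
      congr 1
      simp [List.append_assoc]

lemma map_shift (days : Int) :
    (PySem.List.pyRange 0 days 1).map (fun y => y + 1) = PySem.List.pyRange 1 (days + 1) 1 := by
  rw [PySem.List.pyRange_one, PySem.List.pyRange_one, List.map_map]
  have hto : (days - 0).toNat = (days + 1 - 1).toNat := by omega
  rw [hto]
  apply List.map_congr_left
  intro k _
  simp only [Function.comp_apply]
  ring

theorem a_eq (days : Int) : iterate_day days = chunkRec (PySem.List.pyRange 1 (days + 1) 1) := by
  simp only [iterate_day]
  rw [foldA (PySem.List.pyRange 0 days 1) [] [] (by simp)]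
  rw [map_shift]
  simp

lemma chunkB : ∀ (len : Nat) (nums : List Int), nums.length = len → nums ≠ [] →
    (List.range ((len + 4) / 5)).map (fun k => (nums.drop (5 * k)).take 5) = chunkRec nums := by
  intro len
  induction len using Nat.strong_induction_on with
  | _ len ih =>
    intro nums hlen hne
    have hpos : 0 < nums.length := List.length_pos_iff.mpr hne
    by_cases h5 : nums.length ≤ 5
    · have hN : (len + 4) / 5 = 1 := by omega
      rw [hN, List.range_one, List.map_singleton]
      rw [chunkRec_small h5]
      simp [List.take_of_length_le h5]
    · have hN : (len + 4) / 5 = ((len - 5) + 4) / 5 + 1 := by omega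
      rw [hN, List.range_succ_eq_map, List.map_cons, List.map_map]
      have htail : (List.range (((len - 5) + 4) / 5)).map
            ((fun k => (nums.drop (5 * k)).take 5) ∘ Nat.succ)
          = (List.range (((len - 5) + 4) / 5)).map
            (fun k => ((nums.drop 5).drop (5 * k)).take 5) := by
        apply List.map_congr_left
        intro k _
        simp only [Function.comp_apply, List.drop_drop]
        have h35 : 5 * Nat.succ k = 5 + 5 * k := by omega
        rw [h35]
      rw [htail, ih (len - 5) (by omega) (nums.drop 5) (by simp [hlen])
        (by apply List.ne_nil_of_length_pos; simp [hlen]; omega)]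
      rw [chunkRec_big h5]
      simp

lemma sliceAt (nums : List Int) (k : Nat) :
    PySem.List.slice nums (some ((0 : Int) + 5 * (k : Int))) (some ((0 : Int) + 5 * (k : Int) + 5))
      = (nums.drop (5 * k)).take 5 := by
  have h1 : ((0 : Int) + 5 * (k : Int)) = ((5 * k : Nat) : Int) := by push_cast; ring
  have h2 : ((0 : Int) + 5 * (k : Int) + 5) = ((5 * k + 5 : Nat) : Int) := by push_cast; ring
  rw [h2, h1, PySem.List.slice_natCast]
  congr 1
  omega

theorem alt_eq (days : Int) : iterate_day_alt days = chunkRec (PySem.List.pyRange 1 (days + 1) 1) := by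
  simp only [iterate_day_alt]
  set nums := PySem.List.pyRange 1 (days + 1) 1 with hn
  rw [PySem.List.len_eq, PySem.List.pyRange_of_pos 0 (nums.length : Int) (by norm_num)]
  by_cases hnil : nums = []
  · have h0 : nums.length = 0 := by rw [hnil]; rfl
    rw [h0]
    simp [hnil, chunkRec_small]
  · have hpos : 0 < nums.length := List.length_pos_iff.mpr hnil
    have hc : (0 : Int) < (nums.length : Int) := by exact_mod_cast hpos
    rw [if_pos hc]
    have hto : (((nums.length : Int) - 0 + 5 - 1) / 5).toNat = (nums.length + 4) / 5 := by omega
    rw [hto, List.map_map]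
    have hmap : (List.range ((nums.length + 4) / 5)).map
          ((fun i => PySem.List.slice nums (some i) (some (i + 5))) ∘ (fun (k : Nat) => (0 : Int) + 5 * (k : Int)))
        = (List.range ((nums.length + 4) / 5)).map (fun k => (nums.drop (5 * k)).take 5) := by
      apply List.map_congr_left
      intro k _
      simp only [Function.comp_apply]
      exact sliceAt nums k
    rw [hmap, chunkB nums.length nums rfl hnil]
    rw [if_neg (chunkRec_ne_nil nums)]

-- ===== VERDICT (by name: the statement is the Claim_ definition above) =====
theorem iterate_day_spec : Claim_equal_iterate_day := by
  intro days _
  unfold Spec_iterate_day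
  rw [a_eq, alt_eq]
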